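-- pv_equiv track=rewrite | github.com/DyDy-star/-plogp- | verl/verl/utils/reward_score/ttrl_math/__init__.py | merge_colon_ended_elements
-- ===== SOURCE A (Python) =====
-- def merge_colon_ended_elements(lst):
--     """
--     合并以冒号结尾的元素与下一个元素
--     来源: CoVo/covo/openrlhf/trainer/ppo_utils/score.py (lines 33-52)
--     """
--     result1 = []
--     i = 0
--     while i < len(lst):
--         # 如果当前元素以冒号结尾
--         if lst[i].endswith(':'):
--             # 将当前元素与下一个元素合并
--             if i + 1 < len(lst):  # 确保有下一个元素
--                 merged_element = lst[i] + "\n" + lst[i + 1]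
--                 result1.append(merged_element)
--                 i += 2  # 跳过当前元素和下一个元素
--             else:
--                 # 如果没有下一个元素，直接添加当前元素
--                 result1.append(lst[i])
--                 i += 1
--         else:
--             # 如果当前元素不以冒号结尾，直接添加到结果列表
--             result1.append(lst[i])
--             i += 1
--     return result1
-- ===== SOURCE B (Python) =====
-- def merge_colon_ended_elements(lst):
--     # Pass 1: streaks[i] = length of the run of consecutive ':'-ended elements ending at i.
--     streaks = []
--     run = 0
--     for e in lst:
--         run = run + 1 if e.endswith(':') else 0
--         streaks.append(run)
--     # Pass 2: element i is absorbed into the previous output entry exactly when the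
--     # streak of ':'-ended elements immediately before it has odd length.
--     result = []
--     for e, prev in zip(lst, [0] + streaks):
--         if prev % 2 == 1:
--             result[-1] += "\n" + e
--         else:
--             result.append(e)
--     return result
-- ===== Notes on version B (the rewrite author's own statement) =====
-- stated objective: alternative
-- what changed: Replaced the greedy index-jumping while loop with a two-pass algorithm: a first pass precomputes the run length of consecutive ':'-ended elements at each position, and a second pass merges element i into the previous output entry exactly when the run ending just before i has odd length (a closed-form parity characterization of A's greedy merge positions).
import Mathlib
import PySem

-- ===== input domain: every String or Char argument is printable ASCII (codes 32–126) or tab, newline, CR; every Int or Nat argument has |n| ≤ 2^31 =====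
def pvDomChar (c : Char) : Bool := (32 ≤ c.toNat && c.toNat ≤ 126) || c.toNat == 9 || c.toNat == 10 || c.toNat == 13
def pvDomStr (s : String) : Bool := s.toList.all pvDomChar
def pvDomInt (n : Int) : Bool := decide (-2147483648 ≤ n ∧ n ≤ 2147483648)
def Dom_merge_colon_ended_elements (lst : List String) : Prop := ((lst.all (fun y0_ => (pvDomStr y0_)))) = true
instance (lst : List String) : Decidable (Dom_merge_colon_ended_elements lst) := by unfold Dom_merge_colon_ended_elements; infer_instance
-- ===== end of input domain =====

-- B replaces A's greedy index-jumping loop with two staged passes: precomputed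
-- ':'-streak lengths, then a merge decided by the parity of the preceding streak
-- (objective: alternative algorithm, same O(n) cost).


-- ===== PORT A =====
-- A's while loop over index i: each iteration consumes lst[i] (and lst[i+1] on a
-- merge, jumping i by 2); rendered as structural recursion on the suffix from i.
def merge_colon_ended_elements (lst : List String) : List String :=
  match lst with
  | [] => []
  | x :: rest =>
    if PySem.Str.endswith x ":" then
      match rest with
      | y :: rest' => (x ++ "\n" ++ y) :: merge_colon_ended_elements rest'
      | [] => [x]
    else
      x :: merge_colon_ended_elements rest

-- ===== PORT B =====
-- Pass 1 of Source B: the loop appending run lengths; state = current run value.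
def colon_streaks (lst : List String) (run : Int) : List Int :=
  match lst with
  | [] => []
  | e :: rest =>
    let run' := if PySem.Str.endswith e ":" then run + 1 else 0
    run' :: colon_streaks rest run'

-- Pass 2 of Source B: one step of the for-loop over zip(lst, [0]+streaks).
-- result[-1] += "\n" + e  ↦  dropLast ++ [getLastD ++ …] (nonempty when prev is odd).
def merge_by_parity_step (res : List String) (p : String × Int) : List String :=
  if PySem.Int.mod p.2 2 = 1 then
    res.dropLast ++ [res.getLastD "" ++ "\n" ++ p.1]
  else
    res ++ [p.1]

def merge_colon_ended_elements_alt (lst : List String) : List String :=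
  let streaks := colon_streaks lst 0
  (lst.zip (0 :: streaks)).foldl merge_by_parity_step []

-- ===== PRECONDITION & SPEC =====
def Spec_merge_colon_ended_elements (lst : List String) (out : List String) : Prop := out = merge_colon_ended_elements_alt lst
instance (lst : List String) (out : List String) : Decidable (Spec_merge_colon_ended_elements lst out) := by unfold Spec_merge_colon_ended_elements; infer_instance

-- ===== CLAIM (what is proved, stated in full; the proofs are below) =====
def Claim_equal_merge_colon_ended_elements : Prop := ∀ (lst : List String), Dom_merge_colon_ended_elements lst → Spec_merge_colon_ended_elements lst (merge_colon_ended_elements lst)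

-- ===== LEMMAS AND PROOFS =====

-- Invariant: when the streak before the current suffix is even, B's fold over the
-- suffix zipped with its (shifted) streaks prepends res to A's result on the suffix.
theorem merge_by_parity_foldl (lst : List String) :
    ∀ (r : Int) (res : List String), PySem.Int.mod r 2 ≠ 1 →
      ((lst.zip (r :: colon_streaks lst r)).foldl merge_by_parity_step res)
        = res ++ merge_colon_ended_elements lst := by
  induction lst using merge_colon_ended_elements.induct with
  | case1 => intro r res _; simp [merge_colon_ended_elements]
  | case2 x hx y rest' ih =>
      intro r res hr
      rw [PySem.Int.mod_eq_emod_of_pos (show (0:Int) < 2 by norm_num)] at hr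
      simp only [PySem.Str.endswith_eq, show (":".toList) = [':'] from rfl] at hx
      have h1 : (r + 1) % 2 = 1 := by omega
      by_cases hy : PySem.Chars.endswith y.toList [':'] = true
      · have h2 : PySem.Int.mod (r + 1 + 1) 2 ≠ 1 := by
          rw [PySem.Int.mod_eq_emod_of_pos (show (0:Int) < 2 by norm_num)]; omega
        simp only [merge_colon_ended_elements, colon_streaks, List.zip_cons_cons,
          List.foldl_cons, merge_by_parity_step,
          PySem.Int.mod_eq_emod_of_pos (show (0:Int) < 2 by norm_num),
          PySem.Str.endswith_eq, show (":".toList) = [':'] from rfl, hx, hy,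
          if_true, if_pos h1, if_neg hr]
        simp only [List.dropLast_concat, List.getLastD_concat]
        rw [ih _ _ h2]
        simp
      · simp only [merge_colon_ended_elements, colon_streaks, List.zip_cons_cons,
          List.foldl_cons, merge_by_parity_step,
          PySem.Int.mod_eq_emod_of_pos (show (0:Int) < 2 by norm_num),
          PySem.Str.endswith_eq, show (":".toList) = [':'] from rfl, hx, hy,
          if_true, if_pos h1, if_neg hr]
        simp only [List.dropLast_concat, List.getLastD_concat, Bool.false_eq_true, if_false]
        rw [ih 0 _ (by decide)]
        simp
  | case3 x hx =>
      intro r res hr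
      rw [PySem.Int.mod_eq_emod_of_pos (show (0:Int) < 2 by norm_num)] at hr
      simp only [PySem.Str.endswith_eq, show (":".toList) = [':'] from rfl] at hx
      simp [merge_colon_ended_elements, colon_streaks, merge_by_parity_step, hx, hr]
  | case4 x rest hx ih =>
      intro r res hr
      rw [PySem.Int.mod_eq_emod_of_pos (show (0:Int) < 2 by norm_num)] at hr
      simp only [PySem.Str.endswith_eq, show (":".toList) = [':'] from rfl] at hx
      rw [merge_colon_ended_elements.eq_def]
      simp only [colon_streaks, List.zip_cons_cons, List.foldl_cons,
        merge_by_parity_step, PySem.Str.endswith_eq,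
        show (":".toList) = [':'] from rfl,
        PySem.Int.mod_eq_emod_of_pos (show (0:Int) < 2 by norm_num)]
      simp only [hx, Bool.false_eq_true, if_false, if_neg hr]
      rw [ih 0 _ (by decide)]
      simp

-- ===== VERDICT (by name: the statement is the Claim_ definition above) =====
theorem merge_colon_ended_elements_spec : Claim_equal_merge_colon_ended_elements := by
  intro lst _
  unfold Spec_merge_colon_ended_elements merge_colon_ended_elements_alt
  simpa using (merge_by_parity_foldl lst 0 [] (by decide)).symm
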